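-- pv_equiv track=rewrite | github.com/pymodproject/pymod | pymod3/pymod_lib/pymod_protocols/modeling_protocols/homology_modeling/__init__.py | get_pir_formatted_sequence
-- ===== SOURCE A (Python) =====
-- def get_pir_formatted_sequence(sequence,multi=False):
--     """
--     Print one block of the PIR alignment file using 60 characters-long lines.
--     """
--     formatted_sequence = ""
--     for s in range(0,len(sequence),60):
--         # For all the lines except the last one.
--         if (len(sequence) - s) > 60:
--             formatted_sequence += sequence[s:s+60] + "\n"
--         # For the last line.
--         else:
--             if not multi:
--                 formatted_sequence += sequence[s:]+"*"+"\n"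
--             else:
--                 formatted_sequence += sequence[s:]+"/*"+"\n"
--     return formatted_sequence
-- ===== SOURCE B (Python) =====
-- def get_pir_formatted_sequence(sequence, multi=False):
--     """Single character-level pass: emit each residue, insert '\n' at every interior
--     60-char boundary via a modulo test, then append the terminator once."""
--     if not sequence:
--         return ""
--     n = len(sequence)
--     out = []
--     for i, ch in enumerate(sequence, 1):
--         out.append(ch)
--         if i % 60 == 0 and i != n:
--             out.append("\n")
--     out.append("/*\n" if multi else "*\n")
--     return "".join(out)
-- ===== Notes on version B (the rewrite author's own statement) =====
-- stated objective: alternative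
-- what changed: Replaced A's slice-by-60 accumulator loop with a per-line terminator branch by a single character-level pass that emits each character and inserts a newline at every interior 60-char boundary via a modulo test, appending the terminator once at the end.
import Mathlib
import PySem

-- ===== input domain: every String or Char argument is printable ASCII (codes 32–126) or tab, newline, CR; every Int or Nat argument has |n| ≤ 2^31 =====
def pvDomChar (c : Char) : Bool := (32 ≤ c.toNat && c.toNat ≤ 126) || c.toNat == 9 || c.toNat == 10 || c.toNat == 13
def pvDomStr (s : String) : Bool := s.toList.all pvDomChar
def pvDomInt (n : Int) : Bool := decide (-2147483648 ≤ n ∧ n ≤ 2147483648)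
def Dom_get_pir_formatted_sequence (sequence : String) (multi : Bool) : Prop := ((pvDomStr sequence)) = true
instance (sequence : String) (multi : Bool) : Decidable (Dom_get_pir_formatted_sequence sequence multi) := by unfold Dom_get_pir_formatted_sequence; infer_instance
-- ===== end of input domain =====

-- B replaces A's slice-by-60 loop (with its in-loop last-line branch) by a single
-- character-level pass inserting '\n' at interior 60-boundaries (objective: alternative).

-- ===== PORT A =====
-- literal port of A: accumulate lines in a loop over range(0, len, 60), branching on the last line
def get_pir_formatted_sequence (sequence : String) (multi : Bool) : String :=
  let seq := sequence.toList
  let formatted_sequence : List Char :=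
    (PySem.List.pyRange 0 (PySem.List.len seq) 60).foldl
      (fun acc s =>
        if PySem.List.len seq - s > 60 then
          acc ++ (PySem.List.slice seq (some s) (some (s + 60)) ++ ['\n'])
        else
          if !multi then
            acc ++ (PySem.List.slice seq (some s) none ++ ['*'] ++ ['\n'])
          else
            acc ++ (PySem.List.slice seq (some s) none ++ ['/', '*'] ++ ['\n']))
      []
  String.ofList formatted_sequence

-- ===== PORT B =====
-- literal port of Source B: empty guard, then one fold over enumerate(sequence, 1) emitting each
-- character plus a '\n' when i % 60 == 0 and i != n; terminator appended once after the loop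
def get_pir_formatted_sequence_alt (sequence : String) (multi : Bool) : String :=
  let seq := sequence.toList
  if seq.isEmpty then ""
  else
    let n := PySem.List.len seq
    let out : List Char :=
      (PySem.List.enumerate seq 1).foldl
        (fun acc p =>
          let acc := acc ++ [p.2]
          if PySem.Int.mod p.1 60 == 0 && p.1 != n then acc ++ ['\n'] else acc)
        []
    String.ofList (out ++ (if multi then ['/', '*', '\n'] else ['*', '\n']))

-- ===== PRECONDITION & SPEC =====
def Spec_get_pir_formatted_sequence (sequence : String) (multi : Bool) (out : String) : Prop := out = get_pir_formatted_sequence_alt sequence multi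
instance (sequence : String) (multi : Bool) (out : String) : Decidable (Spec_get_pir_formatted_sequence sequence multi out) := by unfold Spec_get_pir_formatted_sequence; infer_instance

-- ===== CLAIM (what is proved, stated in full; the proofs are below) =====
def Claim_equal_get_pir_formatted_sequence : Prop := ∀ (sequence : String) (multi : Bool), Dom_get_pir_formatted_sequence sequence multi → Spec_get_pir_formatted_sequence sequence multi (get_pir_formatted_sequence sequence multi)

-- ===== LEMMAS AND PROOFS =====

-- A's per-iteration contribution
def pirG (seq : List Char) (multi : Bool) (s : Int) : List Char :=
  if PySem.List.len seq - s > 60 then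
    PySem.List.slice seq (some s) (some (s + 60)) ++ ['\n']
  else
    if !multi then
      PySem.List.slice seq (some s) none ++ ['*'] ++ ['\n']
    else
      PySem.List.slice seq (some s) none ++ ['/', '*'] ++ ['\n']

-- B's per-character contribution
def bpiece (n : Int) (p : Int × Char) : List Char :=
  if PySem.Int.mod p.1 60 == 0 && p.1 != n then [p.2, '\n'] else [p.2]

lemma pyRange_sixty_singleton {L : Nat} (h0 : 0 < L) (h1 : L ≤ 60) :
    PySem.List.pyRange 0 (L : Int) 60 = [0] := by
  rw [PySem.List.pyRange_of_pos 0 (L : Int) (by norm_num)]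
  have hcount : (((L : Int) - 0 + 60 - 1) / 60).toNat = 1 := by
    have h2 : ((L : Int) - 0 + 60 - 1) / 60 = 1 := by
      have h59 : (L : Int) - 0 + 60 - 1 = ((L : Int) - 1) + 1 * 60 := by ring
      rw [h59, Int.add_mul_ediv_right _ _ (by norm_num : (60:Int) ≠ 0)]
      rw [Int.ediv_eq_zero_of_lt (by omega) (by omega)]
      norm_num
    omega
  have hlt : (0:Int) < (L:Int) := by omega
  rw [if_pos hlt]
  norm_num at hcount ⊢
  rw [hcount]
  simp [List.range_succ]

lemma pyRange_sixty_cons {L : Nat} (h : 60 < L) :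
    PySem.List.pyRange 0 (L : Int) 60 =
      0 :: (PySem.List.pyRange 0 (((L - 60 : Nat) : Int)) 60).map (· + 60) := by
  rw [PySem.List.pyRange_of_pos 0 (L : Int) (by norm_num),
      PySem.List.pyRange_of_pos 0 (((L - 60 : Nat) : Int)) (by norm_num)]
  have hL60 : ((L - 60 : Nat) : Int) = (L : Int) - 60 := by omega
  have h2 : (0 : Int) < ((L - 60 : Nat) : Int) := by omega
  have hlt : (0 : Int) < (L : Int) := by omega
  rw [if_pos hlt, if_pos h2]
  have hcount : (((L : Int) - 0 + 60 - 1) / 60).toNat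
      = ((((L - 60 : Nat) : Int) - 0 + 60 - 1) / 60).toNat + 1 := by
    have e : (L : Int) - 0 + 60 - 1 = (((L - 60 : Nat) : Int) - 0 + 60 - 1) + 1 * 60 := by
      rw [hL60]; ring
    rw [e, Int.add_mul_ediv_right _ _ (by norm_num : (60:Int) ≠ 0)]
    have hnn : 0 ≤ (((L - 60 : Nat) : Int) - 0 + 60 - 1) / 60 :=
      Int.ediv_nonneg (by omega) (by norm_num)
    omega
  rw [hcount, List.range_succ_eq_map]
  simp only [List.map_cons, List.map_map]
  refine congrArg₂ List.cons (by norm_num) ?_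
  apply List.map_congr_left
  intro k _
  simp [Function.comp, Nat.succ_eq_add_one]
  ring

lemma mem_pyRange_sixty {m s : Int} (hs : s ∈ PySem.List.pyRange 0 m 60) : 0 ≤ s ∧ s < m := by
  have := (PySem.List.mem_pyRange_iff_of_pos (by norm_num : (0:Int) < 60) s).mp hs
  exact ⟨this.1, this.2.1⟩

lemma chunk_shift (seq : List Char) {s : Int} (hs : 0 ≤ s) :
    PySem.List.slice seq (some (s + 60)) (some (s + 60 + 60))
      = PySem.List.slice (seq.drop 60) (some s) (some (s + 60)) := by
  rw [PySem.List.slice_toNat seq (by omega) (by omega),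
      PySem.List.slice_toNat (seq.drop 60) hs (by omega),
      List.drop_drop]
  congr 1
  · omega
  · congr 1; omega

lemma pirG_shift (seq : List Char) (multi : Bool) {s : Int} (h : 60 < seq.length)
    (hs : 0 ≤ s) : pirG seq multi (s + 60) = pirG (seq.drop 60) multi s := by
  have hcond : (PySem.List.len seq - (s + 60) > 60) ↔ (PySem.List.len (seq.drop 60) - s > 60) := by
    simp [PySem.List.len_eq]; omega
  have htail : PySem.List.slice seq (some (s + 60)) none
      = PySem.List.slice (seq.drop 60) (some s) none := by
    rw [PySem.List.slice_from seq (by omega), PySem.List.slice_from (seq.drop 60) hs,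
        List.drop_drop]
    congr 1; omega
  unfold pirG
  by_cases hc : PySem.List.len seq - (s + 60) > 60
  · rw [if_pos hc, if_pos (hcond.mp hc), chunk_shift seq hs]
  · rw [if_neg hc, if_neg (fun hc' => hc (hcond.mpr hc')), htail]

-- A's loop, rewritten as one flatMap of its per-iteration pieces
lemma fold_eq_flatMap (seq : List Char) (multi : Bool) :
    (PySem.List.pyRange 0 (PySem.List.len seq) 60).foldl
      (fun acc s =>
        if PySem.List.len seq - s > 60 then
          acc ++ (PySem.List.slice seq (some s) (some (s + 60)) ++ ['\n'])
        else
          if !multi then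
            acc ++ (PySem.List.slice seq (some s) none ++ ['*'] ++ ['\n'])
          else
            acc ++ (PySem.List.slice seq (some s) none ++ ['/', '*'] ++ ['\n']))
      [] = (PySem.List.pyRange 0 (PySem.List.len seq) 60).flatMap (pirG seq multi) := by
  have hbody : (fun (acc : List Char) (s : Int) =>
        if PySem.List.len seq - s > 60 then
          acc ++ (PySem.List.slice seq (some s) (some (s + 60)) ++ ['\n'])
        else
          if !multi then
            acc ++ (PySem.List.slice seq (some s) none ++ ['*'] ++ ['\n'])
          else
            acc ++ (PySem.List.slice seq (some s) none ++ ['/', '*'] ++ ['\n']))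
      = (fun acc s => acc ++ pirG seq multi s) := by
    funext acc s
    unfold pirG
    split_ifs <;> rfl
  rw [hbody, PySem.List.foldl_append_eq_flatMap]
  simp

-- B's loop, rewritten as one flatMap of its per-character pieces
lemma bfold_eq_flatMap (seq : List Char) (n : Int) :
    (PySem.List.enumerate seq 1).foldl
      (fun acc p =>
        let acc := acc ++ [p.2]
        if PySem.Int.mod p.1 60 == 0 && p.1 != n then acc ++ ['\n'] else acc)
      [] = (PySem.List.enumerate seq 1).flatMap (bpiece n) := by
  have hbody : (fun (acc : List Char) (p : Int × Char) =>
        let acc := acc ++ [p.2]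
        if PySem.Int.mod p.1 60 == 0 && p.1 != n then acc ++ ['\n'] else acc)
      = (fun acc p => acc ++ bpiece n p) := by
    funext acc p
    unfold bpiece
    split_ifs
    · simp
    · rfl
  rw [hbody, PySem.List.foldl_append_eq_flatMap]
  simp

lemma bpiece_no_trigger {n i : Int} (c : Char)
    (h : ¬ (PySem.Int.mod i 60 = 0 ∧ i ≠ n)) : bpiece n (i, c) = [c] := by
  unfold bpiece
  have : ¬ (PySem.Int.mod i 60 == 0 && i != n) = true := by
    simp only [Bool.and_eq_true, beq_iff_eq, bne_iff_ne]
    exact h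
  rw [if_neg this]

-- indices k, k+1, …, k+a.length-1 all non-triggering ⇒ the pass just copies a
lemma flatMap_no_trigger (a : List Char) (k n : Int)
    (h : ∀ i : Int, k ≤ i → i < k + a.length → ¬ (PySem.Int.mod i 60 = 0 ∧ i ≠ n)) :
    (PySem.List.enumerate a k).flatMap (bpiece n) = a := by
  induction a generalizing k with
  | nil => simp [PySem.List.enumerate_nil]
  | cons c t ih =>
    rw [PySem.List.enumerate_cons, List.flatMap_cons,
        bpiece_no_trigger c (h k le_rfl (by simp only [List.length_cons]; push_cast; omega)),
        ih (k + 1) (fun i h1 h2 => h i (by omega) (by simp at h2 ⊢; omega))]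
    rfl

lemma mod_sixty_add {j r : Int} (hj : (60:Int) ∣ j) (h0 : 0 ≤ r) (h60 : r < 60) :
    PySem.Int.mod (j + r) 60 = r := by
  rw [PySem.Int.mod_eq_emod_of_pos (by norm_num)]
  obtain ⟨q, rfl⟩ := hj
  omega

-- a full 60-char interior line: indices j+1 … j+60, only j+60 triggers (and j+60 ≠ n)
lemma flatMap_full_line (a : List Char) (j n : Int) (hlen : a.length = 60)
    (hj : (60:Int) ∣ j) (hn : j + 60 ≠ n) :
    (PySem.List.enumerate a (j + 1)).flatMap (bpiece n) = a ++ ['\n'] := by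
  have hne : a ≠ [] := by intro hc; rw [hc] at hlen; simp at hlen
  have hsplit : a = a.dropLast ++ [a.getLast hne] := (List.dropLast_append_getLast hne).symm
  have hdl : a.dropLast.length = 59 := by rw [List.length_dropLast, hlen]
  conv_lhs => rw [hsplit]
  rw [PySem.List.enumerate_append, List.flatMap_append]
  rw [flatMap_no_trigger a.dropLast (j + 1) n (by
    intro i h1 h2
    rw [hdl] at h2
    rintro ⟨hm, -⟩
    have : PySem.Int.mod i 60 = i - j := by
      have := mod_sixty_add (r := i - j) hj (by omega) (by push_cast at h2; omega)
      rwa [add_sub_cancel] at this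
    omega)]
  have hidx : j + 1 + (a.dropLast.length : Int) = j + 60 := by rw [hdl]; push_cast; ring
  rw [hidx, PySem.List.enumerate_cons, PySem.List.enumerate_nil, List.flatMap_cons]
  have htrig : bpiece n (j + 60, a.getLast hne) = [a.getLast hne, '\n'] := by
    unfold bpiece
    simp [hn, hj]
  rw [htrig]
  conv_rhs => rw [hsplit]
  simp

-- the last line (length ≤ 60): indices j+1 … j+len = n, no interior trigger
lemma flatMap_last_line (a : List Char) (j : Int) (h0 : a ≠ [])
    (hle : a.length ≤ 60) (hj : (60:Int) ∣ j) :
    (PySem.List.enumerate a (j + 1)).flatMap (bpiece (j + a.length)) = a := by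
  apply flatMap_no_trigger
  intro i h1 h2
  rintro ⟨hm, hne⟩
  have hlt : i - j < 60 := by
    by_contra hc
    push_neg at hc
    have : i = j + 60 := by omega
    have hl60 : a.length = 60 := by omega
    exact hne (by push_cast [hl60]; omega)
  have : PySem.Int.mod i 60 = i - j := by
    have := mod_sixty_add (r := i - j) hj (by omega) hlt
    rwa [add_sub_cancel] at this
  omega

-- B's pass, shifted start: equals the '\n'-join of the 60-char chunks
lemma b_main (seq : List Char) (j : Int) (h : seq ≠ []) (hj : (60:Int) ∣ j) :
    (PySem.List.enumerate seq (j + 1)).flatMap (bpiece (j + seq.length)) =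
      PySem.Chars.join ['\n']
        ((PySem.List.pyRange 0 (seq.length : Int) 60).map
          (fun i => PySem.List.slice seq (some i) (some (i + 60)))) := by
  have h0 : 0 < seq.length := List.length_pos_iff.mpr h
  by_cases hle : seq.length ≤ 60
  · rw [pyRange_sixty_singleton h0 hle]
    have hfull : PySem.List.slice seq (some 0) (some (0 + 60)) = seq := by
      rw [PySem.List.slice_toNat seq (by norm_num) (by norm_num)]
      simpa using List.take_of_length_le (by omega)
    simp only [List.map_cons, List.map_nil, PySem.Chars.join_singleton, hfull]
    exact flatMap_last_line seq j h hle hj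
  · have hgt : 60 < seq.length := by omega
    have htake : seq.take 60 ++ seq.drop 60 = seq := List.take_append_drop 60 seq
    have htl : (seq.take 60).length = 60 := by simp; omega
    have htl_ne : seq.drop 60 ≠ [] := by
      intro hc
      have := congrArg List.length hc
      simp at this; omega
    -- split the enumeration at the first 60 characters
    conv_lhs => rw [← htake]
    rw [PySem.List.enumerate_append, List.flatMap_append]
    have hidx : j + 1 + ((seq.take 60).length : Int) = (j + 60) + 1 := by rw [htl]; push_cast; ring
    have hn60 : j + ((seq.take 60 ++ seq.drop 60).length : Int)
        = (j + 60) + ((seq.drop 60).length : Int) := by simp; push_cast; omega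
    rw [hidx, hn60,
        flatMap_full_line (seq.take 60) j ((j+60) + ((seq.drop 60).length : Int)) htl hj
          (by have : 0 < (seq.drop 60).length := List.length_pos_iff.mpr htl_ne; push_cast; omega),
        b_main (seq.drop 60) (j + 60) htl_ne (dvd_add hj (dvd_refl 60))]
    -- now manipulate the chunk list of the whole sequence
    have hL : ((seq.length - 60 : Nat) : Int) = ((seq.drop 60).length : Int) := by simp
    rw [pyRange_sixty_cons hgt, hL]
    have hheadB : PySem.List.slice seq (some 0) (some (0 + 60)) = seq.take 60 := by
      rw [PySem.List.slice_toNat seq (by norm_num) (by norm_num)]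
      simp
    have hmapC : ((PySem.List.pyRange 0 ((seq.drop 60).length : Int) 60).map (· + 60)).map
          (fun i => PySem.List.slice seq (some i) (some (i + 60)))
        = (PySem.List.pyRange 0 ((seq.drop 60).length : Int) 60).map
            (fun i => PySem.List.slice (seq.drop 60) (some i) (some (i + 60))) := by
      rw [List.map_map]
      exact List.map_congr_left fun s hs => chunk_shift seq (mem_pyRange_sixty hs).1
    have hr'ne : PySem.List.pyRange 0 ((seq.drop 60).length : Int) 60 ≠ [] := by
      have h0' : 0 < (seq.drop 60).length := List.length_pos_iff.mpr htl_ne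
      exact List.ne_nil_of_mem
        ((PySem.List.mem_pyRange_iff_of_pos (by norm_num) 0).mpr
          ⟨le_refl 0, by omega, by simp⟩)
    obtain ⟨q, rest, hqr⟩ := List.exists_cons_of_ne_nil hr'ne
    simp only [List.map_cons, hheadB, hmapC]
    rw [hqr]
    simp only [List.map_cons, PySem.Chars.join_cons_cons]
termination_by seq.length
decreasing_by simp; omega

-- A's chunk pass with its in-loop branch equals join-of-chunks plus one terminator
lemma pir_main (seq : List Char) (multi : Bool) (h : seq ≠ []) :
    (PySem.List.pyRange 0 (seq.length : Int) 60).flatMap (pirG seq multi) =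
      PySem.Chars.join ['\n']
          ((PySem.List.pyRange 0 (seq.length : Int) 60).map
            (fun i => PySem.List.slice seq (some i) (some (i + 60))))
        ++ (if multi then ['/', '*'] else ['*']) ++ ['\n'] := by
  have h0 : 0 < seq.length := List.length_pos_iff.mpr h
  by_cases hle : seq.length ≤ 60
  · rw [pyRange_sixty_singleton h0 hle]
    have hfull : PySem.List.slice seq (some 0) (some (0 + 60)) = seq := by
      rw [PySem.List.slice_toNat seq (by norm_num) (by norm_num)]
      simpa using List.take_of_length_le (by omega)
    have htail : PySem.List.slice seq (some 0) none = seq := by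
      rw [PySem.List.slice_from seq (by norm_num)]
      simp
    have hc : ¬ (PySem.List.len seq - 0 > 60) := by simp [PySem.List.len_eq]; omega
    simp only [List.flatMap_cons, List.flatMap_nil, List.append_nil, List.map_cons,
      List.map_nil, PySem.Chars.join_singleton, hfull]
    unfold pirG
    rw [if_neg hc]
    cases multi <;> simp [htail]
  · have hgt : 60 < seq.length := by omega
    have hL : ((seq.length - 60 : Nat) : Int) = ((seq.drop 60).length : Int) := by
      simp
    have htl_ne : seq.drop 60 ≠ [] := by
      intro hc
      have := congrArg List.length hc
      simp at this
      omega
    rw [pyRange_sixty_cons hgt, hL]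
    have hr'ne : PySem.List.pyRange 0 ((seq.drop 60).length : Int) 60 ≠ [] := by
      have h0' : 0 < (seq.drop 60).length := List.length_pos_iff.mpr htl_ne
      exact List.ne_nil_of_mem
        ((PySem.List.mem_pyRange_iff_of_pos (by norm_num) 0).mpr
          ⟨le_refl 0, by omega, by simp⟩)
    have hheadA : pirG seq multi 0 = seq.take 60 ++ ['\n'] := by
      unfold pirG
      have hc : PySem.List.len seq - 0 > 60 := by simp [PySem.List.len_eq]; omega
      rw [if_pos hc, PySem.List.slice_toNat seq (by norm_num) (by norm_num)]
      simp
    have hheadB : PySem.List.slice seq (some 0) (some (0 + 60)) = seq.take 60 := by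
      rw [PySem.List.slice_toNat seq (by norm_num) (by norm_num)]
      simp
    have hmapG : ((PySem.List.pyRange 0 ((seq.drop 60).length : Int) 60).map (· + 60)).flatMap
          (pirG seq multi)
        = (PySem.List.pyRange 0 ((seq.drop 60).length : Int) 60).flatMap
            (pirG (seq.drop 60) multi) := by
      rw [List.flatMap_map]
      exact List.flatMap_congr fun s hs =>
        pirG_shift seq multi hgt (mem_pyRange_sixty hs).1
    have hmapC : ((PySem.List.pyRange 0 ((seq.drop 60).length : Int) 60).map (· + 60)).map
          (fun i => PySem.List.slice seq (some i) (some (i + 60)))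
        = (PySem.List.pyRange 0 ((seq.drop 60).length : Int) 60).map
            (fun i => PySem.List.slice (seq.drop 60) (some i) (some (i + 60))) := by
      rw [List.map_map]
      exact List.map_congr_left fun s hs => chunk_shift seq (mem_pyRange_sixty hs).1
    have IH := pir_main (seq.drop 60) multi htl_ne
    obtain ⟨q, rest, hqr⟩ := List.exists_cons_of_ne_nil hr'ne
    simp only [List.flatMap_cons, hheadA, hmapG, IH, List.map_cons, hheadB, hmapC]
    rw [hqr]
    simp only [List.map_cons, PySem.Chars.join_cons_cons]
    simp [List.append_assoc]
termination_by seq.length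
decreasing_by simp; omega

-- ===== VERDICT (by name: the statement is the Claim_ definition above) =====
theorem get_pir_formatted_sequence_spec : Claim_equal_get_pir_formatted_sequence := by
  intro sequence multi _
  unfold Spec_get_pir_formatted_sequence
  unfold get_pir_formatted_sequence get_pir_formatted_sequence_alt
  by_cases hemp : sequence.toList = []
  · simp only [hemp]
    norm_num [PySem.List.len_eq, PySem.List.pyRange, PySem.List.enumerate]
  · simp only [List.isEmpty_iff, hemp, ite_false]
    apply congrArg String.ofList
    rw [fold_eq_flatMap, bfold_eq_flatMap]
    simp only [PySem.List.len_eq]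
    rw [pir_main sequence.toList multi hemp]
    have hb := b_main sequence.toList 0 hemp (by norm_num)
    simp only [zero_add] at hb
    rw [hb]
    cases multi <;> simp [List.append_assoc]
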